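-- pv_equiv track=rewrite | github.com/blaketylerfullerton/PipelineParralellism | src/model.py | _block_slices
-- ===== SOURCE A (Python) =====
-- def _block_slices(num_blocks: int, num_stages: int) -> list:
--     """Return list of (start, end) index pairs, one per stage."""
--     base = num_blocks // num_stages
--     remainder = num_blocks % num_stages
--     slices, start = [], 0
--     for i in range(num_stages):
--         count = base + (1 if i < remainder else 0)
--         slices.append((start, start + count))
--         start += count
--     return slices
-- ===== SOURCE B (Python) =====
-- def _block_slices(num_blocks: int, num_stages: int) -> list:
--     """Return list of (start, end) index pairs, one per stage."""
--     base, remainder = divmod(num_blocks, num_stages)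
--     return [(i * base + min(i, remainder), (i + 1) * base + min(i + 1, remainder))
--             for i in range(num_stages)]
-- ===== Notes on version B (the rewrite author's own statement) =====
-- stated objective: simpler
-- what changed: Replaced the loop that threads a running start accumulator with a stateless list comprehension computing each stage's bounds from the closed form i*base + min(i, remainder).
import Mathlib
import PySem

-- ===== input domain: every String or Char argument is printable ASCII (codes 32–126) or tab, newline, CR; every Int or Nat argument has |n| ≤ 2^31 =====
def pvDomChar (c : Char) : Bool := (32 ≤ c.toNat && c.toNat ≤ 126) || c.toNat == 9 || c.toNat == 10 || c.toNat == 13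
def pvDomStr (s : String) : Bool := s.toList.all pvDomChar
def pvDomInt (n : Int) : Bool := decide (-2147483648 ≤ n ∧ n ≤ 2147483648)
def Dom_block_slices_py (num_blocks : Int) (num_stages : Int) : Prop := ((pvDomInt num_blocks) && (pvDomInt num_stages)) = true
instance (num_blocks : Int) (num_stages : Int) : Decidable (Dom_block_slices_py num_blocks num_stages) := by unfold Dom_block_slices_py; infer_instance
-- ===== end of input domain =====

-- B replaces the running `start` accumulator with a stateless closed form
-- start_i = i*base + min(i, remainder); objective: simpler.


-- ===== PORT A =====
def block_slices_py (num_blocks : Int) (num_stages : Int) : List (Int × Int) :=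
  let base := PySem.Int.floordiv num_blocks num_stages
  let remainder := PySem.Int.mod num_blocks num_stages
  let st := (PySem.List.pyRange 0 num_stages 1).foldl
    (fun (st : List (Int × Int) × Int) i =>
      let count := base + (if i < remainder then (1 : Int) else 0)
      (st.1 ++ [(st.2, st.2 + count)], st.2 + count)) ([], 0)
  st.1

-- ===== PORT B =====
def block_slices_py_alt (num_blocks : Int) (num_stages : Int) : List (Int × Int) :=
  let base := PySem.Int.floordiv num_blocks num_stages
  let remainder := PySem.Int.mod num_blocks num_stages
  (PySem.List.pyRange 0 num_stages 1).map
    (fun i => (i * base + min i remainder, (i + 1) * base + min (i + 1) remainder))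

-- ===== PRECONDITION & SPEC =====
-- Pre_ excludes exactly num_stages = 0, where Python A raises ZeroDivisionError.
def Pre_block_slices_py (num_blocks : Int) (num_stages : Int) : Prop := num_stages ≠ 0
instance (num_blocks : Int) (num_stages : Int) : Decidable (Pre_block_slices_py num_blocks num_stages) := by unfold Pre_block_slices_py; infer_instance
def pvWitness_block_slices_py : Int × Int := (10, 3)

def Spec_block_slices_py (num_blocks : Int) (num_stages : Int) (out : List (Int × Int)) : Prop := out = block_slices_py_alt num_blocks num_stages
instance (num_blocks : Int) (num_stages : Int) (out : List (Int × Int)) : Decidable (Spec_block_slices_py num_blocks num_stages out) := by unfold Spec_block_slices_py; infer_instance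

-- ===== CLAIM (what is proved, stated in full; the proofs are below) =====
def Claim_equal_block_slices_py : Prop := ∀ (num_blocks : Int) (num_stages : Int), Dom_block_slices_py num_blocks num_stages → Pre_block_slices_py num_blocks num_stages → Spec_block_slices_py num_blocks num_stages (block_slices_py num_blocks num_stages)

-- ===== LEMMAS AND PROOFS =====

-- Loop invariant: starting the fold at index a with start = a*b + min a r
-- produces exactly the closed-form pairs for indices a, a+1, …, a+n-1.
theorem block_slices_loop (b r : Int) (hr : 0 ≤ r) :
    ∀ (n : Nat) (a : Int) (acc : List (Int × Int)),
    ((PySem.List.pyRange a (a + n) 1).foldl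
      (fun (st : List (Int × Int) × Int) i =>
        let count := b + (if i < r then (1 : Int) else 0)
        (st.1 ++ [(st.2, st.2 + count)], st.2 + count)) (acc, a * b + min a r)).1
    = acc ++ (PySem.List.pyRange a (a + n) 1).map
        (fun i => (i * b + min i r, (i + 1) * b + min (i + 1) r)) := by
  intro n
  induction n with
  | zero => intro a acc; simp [show PySem.List.pyRange a (a + (0:Nat)) 1 = [] from PySem.List.pyRange_one_eq_nil (by omega)]
  | succ m ih =>
    intro a acc
    have hlt : a < a + ((m : Nat) + 1 : Nat) := by push_cast; omega
    rw [PySem.List.pyRange_one_cons hlt]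
    simp only [List.foldl_cons, List.map_cons]
    have hm : min (a + 1) r = min a r + (if a < r then (1:Int) else 0) := by
      split_ifs with h <;> omega
    have h1 : a * b + min a r + (b + (if a < r then (1:Int) else 0))
        = (a + 1) * b + min (a + 1) r := by rw [hm]; ring
    have harr : a + ((m : Nat) + 1 : Nat) = (a + 1) + (m : Nat) := by push_cast; omega
    rw [harr]
    rw [h1]
    have := ih (a + 1) (acc ++ [(a * b + min a r, (a + 1) * b + min (a + 1) r)])
    rw [this]
    simp

-- ===== VERDICT (by name: the statement is the Claim_ definition above) =====
theorem block_slices_py_spec : Claim_equal_block_slices_py := by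
  intro nb ns _ hpre
  unfold Spec_block_slices_py block_slices_py block_slices_py_alt
  by_cases hpos : 0 < ns
  · have hr : 0 ≤ PySem.Int.mod nb ns := by
      rw [PySem.Int.mod_eq_emod_of_pos (a := nb) hpos]; exact Int.emod_nonneg nb (by omega)
    have hkey := block_slices_loop (PySem.Int.floordiv nb ns) (PySem.Int.mod nb ns) hr
      ns.toNat 0 []
    simp only [zero_mul, zero_add] at hkey
    have hcast : ((ns.toNat : Int)) = ns := by omega
    rw [hcast] at hkey
    have hmin : min (0:Int) (PySem.Int.mod nb ns) = 0 := by omega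
    simp only [hmin] at hkey
    simpa using hkey
  · have hnil : PySem.List.pyRange 0 ns 1 = [] :=
      PySem.List.pyRange_one_eq_nil (by omega)
    simp [hnil]
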